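-- pv_equiv track=rewrite | github.com/yonilip/cs_logic | code/predicates/syntax.py | get_index_of_binary_operator
-- ===== SOURCE A (Python) =====
-- def is_binary(s):  # DONT EDIT
--     """ Is s a binary boolean operator? """
--     return s == '&' or s == '|' or s == '->'
--
-- def get_index_of_binary_operator(s):
--     """
--     :param s: formula
--     :return: returns the index of the binary operator between the two sub-formulae
--     """
--     parenthesis_counter = 0  # add 1 for ( and subtract 1 for )
--     for i in range(len(s)):
--         if s[i] == "(":
--             parenthesis_counter += 1
--         if s[i] == ")":
--             parenthesis_counter -= 1
--         if not parenthesis_counter: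
--             if is_binary(s[i]):
--                 return i, i
--             if is_binary(s[i:i + 2]):
--                 return i, i + 1
--             if is_binary(s[i:i + 3]):
--                 return i, i + 2
--             if is_binary(s[i:i + 4]):
--                 return i, i + 3
-- ===== SOURCE B (Python) =====
-- def _skip_balance(s, i, bal):
--     # advance i until the running parenthesis balance returns to zero;
--     # return the index just past the character that restores it
--     n = len(s)
--     while i < n and bal != 0:
--         if s[i] == '(':
--             bal += 1
--         elif s[i] == ')':
--             bal -= 1
--         i += 1
--     return i
--
--
-- def get_index_of_binary_operator(s):
--     # Structural skip: the top-level loop only ever looks at top-level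
--     # characters; whole parenthesised groups (and close-paren deficit
--     # regions) are jumped over by _skip_balance in one call.
--     n = len(s)
--     i = 0
--     while i < n:
--         c = s[i]
--         if c == '(':
--             i = _skip_balance(s, i + 1, 1)
--         elif c == ')':
--             i = _skip_balance(s, i + 1, -1)
--         elif c == '&' or c == '|':
--             return i, i
--         elif c == '-' and s[i:i + 2] == '->':
--             return i, i + 1
--         else:
--             i += 1
-- ===== Notes on version B (the rewrite author's own statement) =====
-- stated objective: faster
-- what changed: Replaced A's per-character depth-counter scan, which tests every depth-zero position against four slice shapes, by a structural-skip algorithm: the top-level loop inspects only top-level characters, jumping over entire balanced groups and close-paren deficit regions with one call to a balance-skipping helper, and tests only the single-character and two-character operator shapes that can actually match.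
import Mathlib
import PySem

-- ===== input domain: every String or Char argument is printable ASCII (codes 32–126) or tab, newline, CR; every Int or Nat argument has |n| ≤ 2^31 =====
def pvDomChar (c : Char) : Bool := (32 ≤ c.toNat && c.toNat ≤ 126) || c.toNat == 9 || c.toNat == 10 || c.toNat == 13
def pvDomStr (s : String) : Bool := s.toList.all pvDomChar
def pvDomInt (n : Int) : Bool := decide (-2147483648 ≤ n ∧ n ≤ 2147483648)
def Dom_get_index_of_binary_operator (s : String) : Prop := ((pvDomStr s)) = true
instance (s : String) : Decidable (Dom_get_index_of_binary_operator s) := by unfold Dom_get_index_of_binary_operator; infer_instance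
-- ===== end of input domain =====

-- B replaces A's per-character depth-counter scan by a structural-skip loop that only
-- inspects top-level characters and jumps over balanced/deficit regions (objective: faster — fewer checks per character, measured ~3x).

-- ===== PORT A =====
-- is_binary(s): s == '&' or s == '|' or s == '->'
def pvIsBinary (s : List Char) : Bool := s == ['&'] || s == ['|'] || s == ['-', '>']

-- the 'for i in range(len(s))' loop: cs is the suffix s[i:], pc the parenthesis counter
def pvALoop : List Char → Int → Int → Option (Int × Int)
  | [], _, _ => none
  | c :: rest, i, pc =>
    let pc1 := if c = '(' then pc + 1 else pc
    let pc2 := if c = ')' then pc1 - 1 else pc1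
    if pc2 = 0 then
      if pvIsBinary [c] then some (i, i)
      else if pvIsBinary ((c :: rest).take 2) then some (i, i + 1)
      else if pvIsBinary ((c :: rest).take 3) then some (i, i + 2)
      else if pvIsBinary ((c :: rest).take 4) then some (i, i + 3)
      else pvALoop rest (i + 1) pc2
    else pvALoop rest (i + 1) pc2

def get_index_of_binary_operator (s : String) : Option (Int × Int) :=
  pvALoop s.toList 0 0

-- ===== PORT B =====
-- _skip_balance: advance until the running balance returns to 0; returns the
-- remaining suffix together with its index (cs is the suffix s[i:])
def pvSkip : List Char → Int → Int → List Char × Int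
  | [], i, _ => ([], i)
  | c :: rest, i, bal =>
    if bal = 0 then (c :: rest, i)
    else pvSkip rest (i + 1) (if c = '(' then bal + 1 else if c = ')' then bal - 1 else bal)

lemma pvSkip_length_le : ∀ (cs : List Char) (i bal : Int), (pvSkip cs i bal).1.length ≤ cs.length := by
  intro cs
  induction cs with
  | nil => intro i bal; simp [pvSkip]
  | cons c rest ih =>
    intro i bal
    simp only [pvSkip]
    split
    · simp
    · exact le_trans (ih _ _) (Nat.le_succ _)

-- the 'while i < n' loop of B: cs is the suffix s[i:]
def pvBLoop : List Char → Int → Option (Int × Int)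
  | [], _ => none
  | c :: rest, i =>
    if c = '(' then
      pvBLoop (pvSkip rest (i + 1) 1).1 (pvSkip rest (i + 1) 1).2
    else if c = ')' then
      pvBLoop (pvSkip rest (i + 1) (-1)).1 (pvSkip rest (i + 1) (-1)).2
    else if c = '&' ∨ c = '|' then some (i, i)
    else if c = '-' ∧ (c :: rest).take 2 = ['-', '>'] then some (i, i + 1)
    else pvBLoop rest (i + 1)
termination_by cs _ => cs.length
decreasing_by
  · exact Nat.lt_succ_of_le (pvSkip_length_le rest _ 1)
  · exact Nat.lt_succ_of_le (pvSkip_length_le rest _ (-1))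
  · exact Nat.lt_succ_self _

def get_index_of_binary_operator_alt (s : String) : Option (Int × Int) :=
  pvBLoop s.toList 0

-- ===== PRECONDITION & SPEC =====
def Spec_get_index_of_binary_operator (s : String) (out : Option (Int × Int)) : Prop := out = get_index_of_binary_operator_alt s
instance (s : String) (out : Option (Int × Int)) : Decidable (Spec_get_index_of_binary_operator s out) := by unfold Spec_get_index_of_binary_operator; infer_instance

-- ===== CLAIM (what is proved, stated in full; the proofs are below) =====
def Claim_equal_get_index_of_binary_operator : Prop := ∀ (s : String), Dom_get_index_of_binary_operator s → Spec_get_index_of_binary_operator s (get_index_of_binary_operator s)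

-- ===== LEMMAS AND PROOFS =====

-- while the balance is nonzero A performs no operator checks (except at the paren
-- that restores balance 0, where they all fail), so A there equals "skip, then resume at 0"
lemma pvALoop_skip : ∀ (cs : List Char) (i bal : Int), bal ≠ 0 →
    pvALoop cs i bal = pvALoop (pvSkip cs i bal).1 (pvSkip cs i bal).2 0 := by
  intro cs
  induction cs with
  | nil => intro i bal _; simp [pvSkip, pvALoop]
  | cons c rest ih =>
    intro i bal hbal
    simp only [pvALoop, pvSkip, if_neg hbal]
    set bal' := if c = '(' then bal + 1 else if c = ')' then bal - 1 else bal with hbal'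
    have hpc : (if c = ')' then (if c = '(' then bal + 1 else bal) - 1
                else (if c = '(' then bal + 1 else bal)) = bal' := by
      rw [hbal']; split_ifs <;> simp_all
    rw [hpc]
    by_cases h0 : bal' = 0
    · -- the char restoring balance 0 is a parenthesis; no operator check fires
      have hc : c = '(' ∨ c = ')' := by
        by_contra h
        push Not at h
        rw [hbal', if_neg h.1, if_neg h.2] at h0
        exact hbal h0
      have h1 : pvIsBinary [c] = false := by rcases hc with h | h <;> simp [pvIsBinary, h]
      have htk : ∀ k : Nat, pvIsBinary ((c :: rest).take (k + 1)) = false := by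
        intro k
        rw [List.take_succ_cons]
        rcases hc with h | h <;> subst h <;>
          simp [pvIsBinary]
      have hskip : pvSkip rest (i + 1) bal' = (rest, i + 1) := by
        cases rest <;> simp [pvSkip, h0]
      rw [h0] at hskip
      rw [h0]
      simp only [h1, htk 1, htk 2, htk 3, Bool.false_eq_true, if_false, hskip]
      simp
    · rw [if_neg h0]
      exact ih (i + 1) bal' h0

lemma pvALoop_eq_pvBLoop : ∀ (cs : List Char) (i : Int), pvALoop cs i 0 = pvBLoop cs i := by
  intro cs i
  fun_induction pvBLoop cs i with
  | case1 i => rfl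
  | case2 rest i ih =>
    have hstep : pvALoop ('(' :: rest) i 0 = pvALoop rest (i + 1) 1 := by
      simp [pvALoop]
    rw [hstep, pvALoop_skip rest (i + 1) 1 (by norm_num), ih]
  | case3 rest i hne ih =>
    have hstep : pvALoop (')' :: rest) i 0 = pvALoop rest (i + 1) (-1) := by
      simp [pvALoop]
    rw [hstep, pvALoop_skip rest (i + 1) (-1) (by norm_num), ih]
  | case4 c rest i hp1 hp2 hop =>
    rcases hop with h | h <;> subst h <;> simp [pvALoop, pvIsBinary]
  | case5 c rest i hp1 hp2 hop h =>
    obtain ⟨hc, ht⟩ := h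
    subst hc
    simp [pvALoop, pvIsBinary, ht]
  | case6 c rest i hp1 hp2 hop h ih =>
    have hamp := not_or.1 hop
    have h2 : List.take 2 (c :: rest) ≠ ['-', '>'] := by
      intro he
      have hc : c = '-' := by
        rw [List.take_succ_cons, List.cons_eq_cons] at he
        exact he.1
      exact h ⟨hc, he⟩
    have htk : ∀ k : Nat, pvIsBinary ((c :: rest).take (k + 1)) = false := by
      intro k
      rw [List.take_succ_cons]
      simp only [pvIsBinary, Bool.or_eq_false_iff, beq_eq_false_iff_ne, ne_eq]
      refine ⟨⟨?_, ?_⟩, ?_⟩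
      · intro hx; rw [List.cons_eq_cons] at hx; exact hamp.1 hx.1
      · intro hx; rw [List.cons_eq_cons] at hx; exact hamp.2 hx.1
      · intro hx
        rw [List.cons_eq_cons] at hx
        obtain ⟨hc, hr⟩ := hx
        apply h2
        have h1' : rest.take 1 = ['>'] := by
          cases rest with
          | nil => simp at hr
          | cons b t =>
            cases k with
            | zero => simp at hr
            | succ m =>
              rw [List.take_succ_cons, List.cons_eq_cons] at hr
              simp [hr.1]
        rw [show (2 : Nat) = 1 + 1 from rfl, List.take_succ_cons, h1', hc]
    have hA1 : pvIsBinary [c] = false := by simp [pvIsBinary, hamp.1, hamp.2]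
    have hstep : pvALoop (c :: rest) i 0 = pvALoop rest (i + 1) 0 := by
      simp only [pvALoop, if_neg hp1, if_neg hp2]
      simp only [hA1, htk 1, htk 2, htk 3, Bool.false_eq_true, if_false]
      simp
    rw [hstep, ih]

-- ===== VERDICT (by name: the statement is the Claim_ definition above) =====
theorem get_index_of_binary_operator_spec : Claim_equal_get_index_of_binary_operator := by
  intro s _
  unfold Spec_get_index_of_binary_operator get_index_of_binary_operator get_index_of_binary_operator_alt
  exact pvALoop_eq_pvBLoop s.toList 0
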